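-- pv_equiv track=rewrite | github.com/Chitra-2024/restaurant-strategy-engine | backend/app/services/analytics_service.py | collect_aspect_sources
-- ===== SOURCE A (Python) =====
-- from collections import defaultdict
-- from collections.abc import Iterable
-- from typing import Any
--
-- def collect_aspect_sources(
--     reviews: Iterable[dict[str, Any]],
-- ) -> dict[str, list[str]]:
--     source_map: dict[str, list[str]] = defaultdict(list)
--
--     for review in reviews:
--         aspect = str(review.get("aspect", "service"))
--         source_url = str(review.get("source_url", "")).strip()
--         if source_url and source_url not in source_map[aspect]:
--             source_map[aspect].append(source_url)
--
--     return {aspect: urls for aspect, urls in source_map.items()}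
-- ===== SOURCE B (Python) =====
-- def collect_aspect_sources(reviews):
--     # Stage 1: flatten to (aspect, stripped_url) pairs, dropping empty URLs.
--     pairs = [(str(r.get("aspect", "service")), str(r.get("source_url", "")).strip())
--              for r in reviews]
--     pairs = [(a, u) for a, u in pairs if u]
--     # Stage 2: first-seen aspect order, then per-aspect scan + ordered dedup.
--     aspects = dict.fromkeys(a for a, _ in pairs)
--     return {a: list(dict.fromkeys(u for a2, u in pairs if a2 == a))
--             for a in aspects}
-- ===== Notes on version B (the rewrite author's own statement) =====
-- stated objective: alternative
-- what changed: B replaces A's incremental dict-building loop (per-review membership test and append into a defaultdict) with staged batch passes: flatten reviews to filtered (aspect, url) pairs, take aspects in first-seen order via dict.fromkeys, then for each aspect rescan the pair list and deduplicate in one dict.fromkeys transform.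
import Mathlib
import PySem

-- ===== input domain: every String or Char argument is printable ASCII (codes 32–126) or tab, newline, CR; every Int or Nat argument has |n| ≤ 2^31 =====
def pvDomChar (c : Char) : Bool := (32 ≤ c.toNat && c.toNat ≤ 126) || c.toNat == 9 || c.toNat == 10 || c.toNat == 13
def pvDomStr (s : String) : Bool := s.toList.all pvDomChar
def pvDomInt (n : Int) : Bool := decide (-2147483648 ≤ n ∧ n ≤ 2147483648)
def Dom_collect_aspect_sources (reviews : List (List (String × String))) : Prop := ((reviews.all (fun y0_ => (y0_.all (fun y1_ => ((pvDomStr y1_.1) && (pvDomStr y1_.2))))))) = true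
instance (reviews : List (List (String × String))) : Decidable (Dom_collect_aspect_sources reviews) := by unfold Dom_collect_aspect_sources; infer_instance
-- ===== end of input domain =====

-- B flattens reviews to filtered (aspect, url) pairs and builds the grouping by per-aspect rescans
-- with a batch ordered dedup, instead of A's incremental dict-building loop (objective: alternative).

-- ===== PORT A =====
-- review.get(k, dflt): first-match lookup in the association list
def pyDictGetD (review : List (String × String)) (k dflt : String) : String :=
  ((review.find? (fun p => p.1 == k)).map (·.2)).getD dflt

def collect_aspect_sources (reviews : List (List (String × String))) : List (String × List String) :=
  let source_map : PySem.Dict String (List String) :=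
    reviews.foldl (fun d review =>
      let aspect := pyDictGetD review "aspect" "service"
      let source_url := PySem.Str.strip (pyDictGetD review "source_url" "")
      if source_url ≠ "" ∧ source_url ∉ d.getD aspect [] then
        d.insert aspect (d.getD aspect [] ++ [source_url])
      else d) PySem.Dict.empty
  source_map.items

-- ===== PORT B =====
-- list(dict.fromkeys(xs)): keep the first occurrence of each element
def dedupKeepFirst (us : List String) : List String :=
  us.foldl (fun acc u => if u ∈ acc then acc else acc ++ [u]) []

def collect_aspect_sources_alt (reviews : List (List (String × String))) : List (String × List String) :=
  let pairs :=
    ((reviews.map (fun r =>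
        (pyDictGetD r "aspect" "service",
         PySem.Str.strip (pyDictGetD r "source_url" "")))).filter (fun p => p.2 ≠ ""))
  let aspects := dedupKeepFirst (pairs.map (·.1))
  aspects.map (fun a => (a, dedupKeepFirst ((pairs.filter (fun p => p.1 == a)).map (·.2))))

-- ===== PRECONDITION & SPEC =====
def Spec_collect_aspect_sources (reviews : List (List (String × String))) (out : List (String × List String)) : Prop := out = collect_aspect_sources_alt reviews
instance (reviews : List (List (String × String))) (out : List (String × List String)) : Decidable (Spec_collect_aspect_sources reviews out) := by unfold Spec_collect_aspect_sources; infer_instance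

-- ===== CLAIM =====
def Claim_equal_collect_aspect_sources : Prop := ∀ (reviews : List (List (String × String))), Dom_collect_aspect_sources reviews → Spec_collect_aspect_sources reviews (collect_aspect_sources reviews)

-- ===== LEMMAS AND PROOFS =====

-- A's loop body, over a pre-extracted non-empty (aspect, url) pair
def stepP (d : PySem.Dict String (List String)) (p : String × String) :
    PySem.Dict String (List String) :=
  if p.2 ∉ d.getD p.1 [] then d.insert p.1 (d.getD p.1 [] ++ [p.2]) else d

-- B's per-aspect value over a pair list
def urlsAt (ps : List (String × String)) (a : String) : List String :=
  dedupKeepFirst ((ps.filter (fun p => p.1 == a)).map (·.2))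

def specOut (ps : List (String × String)) : List (String × List String) :=
  (dedupKeepFirst (ps.map (·.1))).map (fun a => (a, urlsAt ps a))

theorem mem_foldl_dedup (us : List String) (acc : List String) (u : String) :
    u ∈ us.foldl (fun acc u => if u ∈ acc then acc else acc ++ [u]) acc ↔ u ∈ acc ∨ u ∈ us := by
  induction us generalizing acc with
  | nil => simp
  | cons v vs ih =>
    rw [List.foldl_cons, ih]
    by_cases h : v ∈ acc
    · rw [if_pos h]
      simp only [List.mem_cons]
      constructor
      · tauto
      · rintro (h1 | rfl | h1)
        · exact Or.inl h1
        · exact Or.inl h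
        · exact Or.inr h1
    · rw [if_neg h]
      simp only [List.mem_append, List.mem_cons]
      tauto

theorem mem_dedupKeepFirst (us : List String) (u : String) :
    u ∈ dedupKeepFirst us ↔ u ∈ us := by
  simpa using mem_foldl_dedup us [] u

theorem dedupKeepFirst_append (v : List String) (u : String) :
    dedupKeepFirst (v ++ [u]) =
      if u ∈ dedupKeepFirst v then dedupKeepFirst v else dedupKeepFirst v ++ [u] := by
  simp [dedupKeepFirst, List.foldl_append]

-- lookup in a dict of shape aspects.map (fun b => (b, g b))
theorem get?_mk_map (aspects : List String) (g : String → List String) (a : String) :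
    (PySem.Dict.mk (aspects.map (fun b => (b, g b)))).get? a
      = if a ∈ aspects then some (g a) else none := by
  induction aspects with
  | nil => simp [PySem.Dict.get?]
  | cons b bs ih =>
    rw [List.map_cons, PySem.Dict.get?_mk_cons]
    by_cases h : b = a
    · subst h; simp
    · have : (b == a) = false := by simp [h]
      simp only [this, Bool.false_eq_true, if_false, ih, List.mem_cons]
      by_cases h2 : a ∈ bs <;> simp [h2, Ne.symm h]

theorem urlsAt_append (ps : List (String × String)) (a u b : String) :
    urlsAt (ps ++ [(a, u)]) b =
      if b = a then
        (if u ∈ urlsAt ps a then urlsAt ps a else urlsAt ps a ++ [u])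
      else urlsAt ps b := by
  unfold urlsAt
  rw [List.filter_append]
  by_cases h : b = a
  · subst h
    simp [dedupKeepFirst_append]
  · have : ((a, u).1 == b) = false := by simp [Ne.symm h]
    simp [List.filter, this, h]

theorem filter_nil_of_not_mem (ps : List (String × String)) (a : String)
    (h : a ∉ ps.map (·.1)) : ps.filter (fun p => p.1 == a) = [] := by
  rw [List.filter_eq_nil_iff]
  intro p hp
  simp only [beq_iff_eq]
  intro hpa
  exact h (by simpa [hpa] using List.mem_map_of_mem (f := (·.1)) hp)

-- the key step: one stepP on the spec dict extends the pair list by one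
theorem step_spec (ps : List (String × String)) (a u : String) :
    stepP (PySem.Dict.mk (specOut ps)) (a, u) = PySem.Dict.mk (specOut (ps ++ [(a, u)])) := by
  have hget : (PySem.Dict.mk (specOut ps)).get? a
      = if a ∈ dedupKeepFirst (ps.map (·.1)) then some (urlsAt ps a) else none := by
    unfold specOut; exact get?_mk_map _ _ a
  by_cases hmem : a ∈ dedupKeepFirst (ps.map (·.1))
  · -- aspect already seen
    have hgD : (PySem.Dict.mk (specOut ps)).getD a [] = urlsAt ps a := by
      rw [PySem.Dict.getD_eq_get?_getD, hget, if_pos hmem]; rfl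
    have haspects : dedupKeepFirst (ps.map (·.1) ++ [a]) = dedupKeepFirst (ps.map (·.1)) := by
      rw [dedupKeepFirst_append, if_pos hmem]
    by_cases hu : u ∈ urlsAt ps a
    · -- URL already collected: both sides unchanged
      unfold stepP
      rw [hgD, if_neg (by simp [hu])]
      apply PySem.Dict.ext
      show specOut ps = specOut (ps ++ [(a, u)])
      unfold specOut
      simp only [List.map_append, List.map_cons, List.map_nil]
      rw [haspects]
      apply List.map_congr_left
      intro b _
      rw [urlsAt_append]
      by_cases hb : b = a
      · subst hb; simp [hu]
      · simp [hb]
    · -- new URL for a seen aspect: in-place value update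
      unfold stepP
      rw [hgD, if_pos hu]
      have hc : (PySem.Dict.mk (specOut ps)).contains a = true := by
        rw [PySem.Dict.contains_eq_isSome_get?, hget, if_pos hmem]; rfl
      apply PySem.Dict.ext
      rw [PySem.Dict.items_insert_of_contains _ _ hc]
      show (specOut ps).map (fun p => if p.1 == a then (a, urlsAt ps a ++ [u]) else p)
          = specOut (ps ++ [(a, u)])
      unfold specOut
      simp only [List.map_append, List.map_cons, List.map_nil]
      rw [haspects, List.map_map]
      apply List.map_congr_left
      intro b _
      rw [urlsAt_append]
      by_cases hb : b = a
      · subst hb; simp [Function.comp, hu]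
      · simp [Function.comp, hb]
  · -- fresh aspect: appended at the end with its single URL
    have hnm : a ∉ ps.map (·.1) := fun h => hmem ((mem_dedupKeepFirst _ _).mpr h)
    have hgD : (PySem.Dict.mk (specOut ps)).getD a [] = [] := by
      rw [PySem.Dict.getD_eq_get?_getD, hget, if_neg hmem]; rfl
    have hc : (PySem.Dict.mk (specOut ps)).contains a = false := by
      rw [PySem.Dict.contains_eq_isSome_get?, hget, if_neg hmem]; rfl
    unfold stepP
    rw [hgD, if_pos (by simp)]
    apply PySem.Dict.ext
    rw [PySem.Dict.items_insert_of_not_contains _ _ hc]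
    show specOut ps ++ [(a, [] ++ [u])] = specOut (ps ++ [(a, u)])
    unfold specOut
    simp only [List.map_append, List.map_cons, List.map_nil]
    rw [dedupKeepFirst_append, if_neg hmem, List.map_append]
    congr 1
    · apply List.map_congr_left
      intro b hb
      rw [urlsAt_append]
      have hb' : b ≠ a := fun h => hmem (h ▸ hb)
      simp [hb']
    · rw [List.map_singleton, urlsAt_append, if_pos rfl]
      unfold urlsAt
      rw [filter_nil_of_not_mem ps a hnm]
      simp [dedupKeepFirst]

theorem foldl_stepP_spec (ps : List (String × String)) :
    ps.foldl stepP PySem.Dict.empty = PySem.Dict.mk (specOut ps) := by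
  induction ps using List.reverseRecOn with
  | nil => rfl
  | append_singleton ps p ih =>
    rw [List.foldl_append, List.foldl_cons, List.foldl_nil, ih]
    obtain ⟨a, u⟩ := p
    exact step_spec ps a u

-- A's fold over reviews is stepP folded over the filtered pair list
theorem foldA_eq_foldP (reviews : List (List (String × String)))
    (d : PySem.Dict String (List String)) :
    reviews.foldl (fun d review =>
      let aspect := pyDictGetD review "aspect" "service"
      let source_url := PySem.Str.strip (pyDictGetD review "source_url" "")
      if source_url ≠ "" ∧ source_url ∉ d.getD aspect [] then
        d.insert aspect (d.getD aspect [] ++ [source_url])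
      else d) d
    = (((reviews.map (fun r =>
        (pyDictGetD r "aspect" "service",
         PySem.Str.strip (pyDictGetD r "source_url" "")))).filter (fun p => p.2 ≠ ""))).foldl stepP d := by
  induction reviews generalizing d with
  | nil => rfl
  | cons r rs ih =>
    rw [List.foldl_cons, List.map_cons]
    by_cases hu : PySem.Str.strip (pyDictGetD r "source_url" "") = ""
    · rw [List.filter_cons_of_neg (by simpa using hu)]
      simp only [hu, ne_eq, not_true_eq_false, false_and, if_false]
      exact ih d
    · rw [List.filter_cons_of_pos (by simpa using hu), List.foldl_cons]
      have : (if PySem.Str.strip (pyDictGetD r "source_url" "") ≠ "" ∧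
          PySem.Str.strip (pyDictGetD r "source_url" "") ∉ d.getD (pyDictGetD r "aspect" "service") [] then
            d.insert (pyDictGetD r "aspect" "service")
              (d.getD (pyDictGetD r "aspect" "service") [] ++ [PySem.Str.strip (pyDictGetD r "source_url" "")])
          else d)
          = stepP d (pyDictGetD r "aspect" "service", PySem.Str.strip (pyDictGetD r "source_url" "")) := by
        unfold stepP
        simp [hu]
      rw [this]
      exact ih _

-- ===== VERDICT =====
theorem collect_aspect_sources_spec : Claim_equal_collect_aspect_sources := by
  intro reviews _
  unfold Spec_collect_aspect_sources collect_aspect_sources collect_aspect_sources_alt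
  rw [foldA_eq_foldP, foldl_stepP_spec]
  rfl
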